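-- pv_equiv track=rewrite | github.com/algoslearner/leetcode | companies/amazon/OA/17_shopping_options.py | shoppingOptions
-- ===== SOURCE A (Python) =====
-- def shoppingOptions(pairOfJeans, pairOfShoes, pairOfSkirts, pairOfTops, dollars):
--     """
--     :type pairOfJeans: List[int]
--     :type pairOfShoes: List[int]
--     :type pairOfSkirts: List[int]
--     :type pairOfTops: List[int]
--     :type dollars: int
--     :rtype: int
--     """
--
--     hash_map = {}
--     count = 0
--
--     for a in pairOfJeans:
--         for b in pairOfShoes:
--             curr_sum = a+b
--             if curr_sum in hash_map:
--                 hash_map[curr_sum] += 1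
--             else:
--                 hash_map[curr_sum] = 1
--
--     for c in pairOfSkirts:
--         for d in pairOfTops:
--             curr_val = dollars - (c + d)
--             li_keys = [k for k in hash_map if k <= curr_val]
--             values = [hash_map.get(k) for k in li_keys]
--             count += sum(values)
--
--     return count
-- ===== SOURCE B (Python) =====
-- def shoppingOptions(pairOfJeans, pairOfShoes, pairOfSkirts, pairOfTops, dollars):
--     sums = sorted(a + b for a in pairOfJeans for b in pairOfShoes)
--     thresholds = sorted(dollars - (c + d) for c in pairOfSkirts for d in pairOfTops)
--     n = len(sums)
--     i = 0
--     total = 0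
--     for t in thresholds:
--         while i < n and sums[i] <= t:
--             i += 1
--         total += i
--     return total
-- ===== Notes on version B (the rewrite author's own statement) =====
-- stated objective: faster
-- what changed: Replaces the counter dict rescanned in full for every skirt+top pair by two sorted lists (jeans+shoes sums, skirt+top thresholds) swept once with a single advancing pointer.
import Mathlib
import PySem

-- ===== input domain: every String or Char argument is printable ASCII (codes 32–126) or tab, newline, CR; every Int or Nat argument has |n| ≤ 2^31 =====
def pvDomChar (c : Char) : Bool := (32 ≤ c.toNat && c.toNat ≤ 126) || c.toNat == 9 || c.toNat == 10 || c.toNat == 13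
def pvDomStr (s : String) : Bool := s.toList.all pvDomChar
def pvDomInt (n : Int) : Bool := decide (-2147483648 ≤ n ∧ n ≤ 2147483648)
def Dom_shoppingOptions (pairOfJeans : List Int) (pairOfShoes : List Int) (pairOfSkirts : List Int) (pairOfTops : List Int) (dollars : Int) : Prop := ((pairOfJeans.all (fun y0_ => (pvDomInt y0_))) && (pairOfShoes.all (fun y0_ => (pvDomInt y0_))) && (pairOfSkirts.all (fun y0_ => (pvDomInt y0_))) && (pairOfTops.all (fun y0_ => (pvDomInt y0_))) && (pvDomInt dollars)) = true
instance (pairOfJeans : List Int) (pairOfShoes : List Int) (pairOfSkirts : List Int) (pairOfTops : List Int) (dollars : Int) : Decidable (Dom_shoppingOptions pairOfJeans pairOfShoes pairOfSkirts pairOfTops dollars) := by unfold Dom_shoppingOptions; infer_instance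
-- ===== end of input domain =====

-- B replaces A's counter dict (rescanned in full for every skirt+top pair) by two sorted
-- lists swept once with a single advancing pointer; objective: faster.

-- ===== PORT A =====
def shoppingOptions (pairOfJeans : List Int) (pairOfShoes : List Int) (pairOfSkirts : List Int) (pairOfTops : List Int) (dollars : Int) : Int :=
  let hm : PySem.Dict Int Int :=
    pairOfJeans.foldl (fun hm a =>
      pairOfShoes.foldl (fun hm b =>
        let currSum := a + b
        if hm.contains currSum then hm.insert currSum (hm.getD currSum 0 + 1)
        else hm.insert currSum 1) hm) PySem.Dict.empty
  pairOfSkirts.foldl (fun count c =>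
    pairOfTops.foldl (fun count d =>
      let currVal := dollars - (c + d)
      let liKeys := hm.keys.filter (fun k => decide (k ≤ currVal))
      -- hash_map.get(k): every k in liKeys is a key of hm, so Python's .get returns its
      -- int value and sum(values) adds them; getD k 0 is exact here
      let values := liKeys.map (fun k => hm.getD k 0)
      count + values.sum) count) 0

-- ===== PORT B =====
-- the inner 'while i < n and sums[i] <= t: i += 1' loop of Source B
def pvAdvance (sums : List Int) (t : Int) (i : Nat) : Nat :=
  match h : sums[i]? with
  | some x => if x ≤ t then pvAdvance sums t (i + 1) else i
  | none => i
termination_by sums.length - i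
decreasing_by
  have := (List.getElem?_eq_some_iff.mp h).1
  omega

def shoppingOptions_alt (pairOfJeans : List Int) (pairOfShoes : List Int) (pairOfSkirts : List Int) (pairOfTops : List Int) (dollars : Int) : Int :=
  let sums := PySem.List.sorted (pairOfJeans.flatMap fun a => pairOfShoes.map fun b => a + b) (fun x => x) false
  let thresholds := PySem.List.sorted (pairOfSkirts.flatMap fun c => pairOfTops.map fun d => dollars - (c + d)) (fun x => x) false
  (thresholds.foldl (fun (st : Nat × Int) t =>
      let i := pvAdvance sums t st.1
      (i, st.2 + (i : Int))) (0, 0)).2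

-- ===== PRECONDITION & SPEC =====
def Spec_shoppingOptions (pairOfJeans : List Int) (pairOfShoes : List Int) (pairOfSkirts : List Int) (pairOfTops : List Int) (dollars : Int) (out : Int) : Prop := out = shoppingOptions_alt pairOfJeans pairOfShoes pairOfSkirts pairOfTops dollars
instance (pairOfJeans : List Int) (pairOfShoes : List Int) (pairOfSkirts : List Int) (pairOfTops : List Int) (dollars : Int) (out : Int) : Decidable (Spec_shoppingOptions pairOfJeans pairOfShoes pairOfSkirts pairOfTops dollars out) := by unfold Spec_shoppingOptions; infer_instance

-- ===== CLAIM (what is proved, stated in full; the proofs are below) =====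
def Claim_equal_shoppingOptions : Prop := ∀ (pairOfJeans : List Int) (pairOfShoes : List Int) (pairOfSkirts : List Int) (pairOfTops : List Int) (dollars : Int), Dom_shoppingOptions pairOfJeans pairOfShoes pairOfSkirts pairOfTops dollars → Spec_shoppingOptions pairOfJeans pairOfShoes pairOfSkirts pairOfTops dollars (shoppingOptions pairOfJeans pairOfShoes pairOfSkirts pairOfTops dollars)

-- ===== LEMMAS AND PROOFS =====

-- the inner while loop advances the pointer to the end of the ≤-t prefix of the remaining suffix
theorem pv_advance_eq (sums : List Int) (t : Int) (i : Nat) :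
    pvAdvance sums t i = i + ((sums.drop i).takeWhile (fun x => decide (x ≤ t))).length := by
  fun_induction pvAdvance with
  | case1 i x h hx ih =>
    obtain ⟨hlt, hget⟩ := List.getElem?_eq_some_iff.mp h
    have hd : sums.drop i = x :: sums.drop (i + 1) := by
      rw [List.drop_eq_getElem_cons hlt, hget]
    rw [ih, hd]
    simp [hx]
    omega
  | case2 i x h hx =>
    obtain ⟨hlt, hget⟩ := List.getElem?_eq_some_iff.mp h
    have hd : sums.drop i = x :: sums.drop (i + 1) := by
      rw [List.drop_eq_getElem_cons hlt, hget]
    rw [hd]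
    simp [hx]
  | case3 i h =>
    have : sums.length ≤ i := by
      by_contra hc
      simp at h
      omega
    simp [List.drop_eq_nil_of_le this]

-- on a sorted list, counting the elements ≤ t is measuring the ≤-t prefix
theorem pv_countP_sorted (l : List Int) (t : Int) (h : l.Pairwise (· ≤ ·)) :
    l.countP (fun x => decide (x ≤ t)) = (l.takeWhile (fun x => decide (x ≤ t))).length := by
  induction l with
  | nil => rfl
  | cons a l ih =>
    rcases List.pairwise_cons.mp h with ⟨ha, hl⟩
    by_cases hat : a ≤ t
    · simp [hat, ih hl]
    · have : l.countP (fun x => decide (x ≤ t)) = 0 := by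
        rw [List.countP_eq_zero]
        intro x hx
        simp only [decide_eq_true_eq]
        intro hxt
        exact hat (le_trans (ha x hx) hxt)
      simp [hat, this]

-- loop invariant of B's single sweep over the sorted thresholds
theorem pv_loop_eq (sums : List Int) (hs : sums.Pairwise (· ≤ ·)) :
    ∀ (ts : List Int), ts.Pairwise (· ≤ ·) →
    ∀ (i : Nat) (total : Int), i ≤ sums.length → (∀ t ∈ ts, ∀ x ∈ sums.take i, x ≤ t) →
    (ts.foldl (fun (st : Nat × Int) t =>
        let i' := pvAdvance sums t st.1
        (i', st.2 + (i' : Int))) (i, total)).2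
      = total + (ts.map (fun t => (sums.countP (fun x => decide (x ≤ t)) : Int))).sum := by
  intro ts
  induction ts with
  | nil => intro _ i total _ _; simp
  | cons t ts ih =>
    intro hp i total hile hpref
    rcases List.pairwise_cons.mp hp with ⟨htts, hts⟩
    -- the advanced pointer equals countP (≤ t) sums
    have hcount : pvAdvance sums t i = sums.countP (fun x => decide (x ≤ t)) := by
      rw [pv_advance_eq]
      have hsplit : sums.countP (fun x => decide (x ≤ t))
          = (sums.take i).countP (fun x => decide (x ≤ t))
            + (sums.drop i).countP (fun x => decide (x ≤ t)) := by
        conv_lhs => rw [← List.take_append_drop i sums]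
        exact List.countP_append ..
      have htake : (sums.take i).countP (fun x => decide (x ≤ t)) = i := by
        have : (sums.take i).countP (fun x => decide (x ≤ t)) = (sums.take i).length :=
          List.countP_eq_length.mpr (by
            intro x hx; simpa using hpref t (by simp) x hx)
        rw [this, List.length_take]; omega
      have hdropP : (sums.drop i).Pairwise (· ≤ ·) := hs.sublist (List.drop_sublist i sums)
      rw [hsplit, htake, pv_countP_sorted _ t hdropP]
    simp only [List.foldl_cons, List.map_cons, List.sum_cons]
    rw [hcount] at *
    rw [ih hts _ _ (by simpa using List.countP_le_length (l := sums) ..) ?_]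
    · ring
    · -- the new prefix is the takeWhile prefix: all its elements are ≤ t ≤ t'
      intro t' ht' x hx
      have hcp : sums.countP (fun x => decide (x ≤ t)) = (sums.takeWhile (fun x => decide (x ≤ t))).length :=
        pv_countP_sorted _ t hs
      rw [hcp] at hx
      have hpre : sums.take (sums.takeWhile (fun x => decide (x ≤ t))).length = sums.takeWhile (fun x => decide (x ≤ t)) :=
        (List.prefix_iff_eq_take.mp (List.takeWhile_prefix _)).symm
      rw [hpre] at hx
      have hxt : x ≤ t := by simpa using List.mem_takeWhile_imp hx
      exact le_trans hxt (htts t' ht')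

-- the counting loop of A, for any dict that holds the multiplicities of the sums list L
theorem pv_A_aux (K T : List Int) (dollars : Int) (L : List Int) (hm : PySem.Dict Int Int)
    (hget : ∀ k : Int, hm.getD k 0 = (L.count k : Int))
    (hkeys : hm.keys = PySem.Set.ofList L) :
    K.foldl (fun count c =>
      T.foldl (fun count d =>
        count + ((hm.keys.filter (fun k => decide (k ≤ dollars - (c + d)))).map (fun k => hm.getD k 0)).sum) count) 0
    = ((K.flatMap fun c => T.map fun d => dollars - (c + d)).map
        (fun t => (L.countP (fun x => decide (x ≤ t)) : Int))).sum := by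
  have hval : ∀ t : Int,
      ((hm.keys.filter (fun k => decide (k ≤ t))).map (fun k => hm.getD k 0)).sum
        = (L.countP (fun x => decide (x ≤ t)) : Int) := by
    intro t
    rw [hkeys]
    rw [List.map_congr_left (fun k _ => hget k)]
    have hperm : (PySem.Set.ofList L).Perm L.dedup := by
      rw [List.perm_ext_iff_of_nodup (PySem.Set.nodup_ofList L) L.nodup_dedup]
      intro a
      rw [PySem.Set.mem_ofList, List.mem_dedup]
    rw [((hperm.filter (fun k => decide (k ≤ t))).map (fun k => (L.count k : Int))).sum_eq]
    have hnat : ((L.dedup.filter (fun k => decide (k ≤ t))).map (fun k => L.count k)).sum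
        = L.countP (fun k => decide (k ≤ t)) :=
      List.sum_map_count_dedup_filter_eq_countP _ L
    calc ((L.dedup.filter (fun k => decide (k ≤ t))).map (fun k => (L.count k : Int))).sum
        = (((L.dedup.filter (fun k => decide (k ≤ t))).map (fun k => L.count k)).sum : Int) := by
          push_cast
          rw [List.map_map]
          rfl
      _ = _ := by rw [hnat]
  rw [show (fun (count : Int) c =>
      T.foldl (fun count d =>
        count + ((hm.keys.filter (fun k => decide (k ≤ dollars - (c + d)))).map (fun k => hm.getD k 0)).sum) count)
    = (fun (count : Int) c => count + (T.map (fun d => (L.countP (fun x => decide (x ≤ dollars - (c + d))) : Int))).sum) from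
      funext fun count => funext fun c => by
        rw [show (fun (count : Int) d =>
            count + ((hm.keys.filter (fun k => decide (k ≤ dollars - (c + d)))).map (fun k => hm.getD k 0)).sum)
          = (fun (count : Int) d => count + (L.countP (fun x => decide (x ≤ dollars - (c + d))) : Int)) from
            funext fun count => funext fun d => by rw [hval]]
        exact PySem.List.foldl_add ..]
  rw [PySem.List.foldl_add, zero_add, List.map_flatMap, List.flatMap_def, List.sum_flatten, List.map_map]
  congr 1
  apply List.map_congr_left
  intro c _
  simp only [Function.comp_apply]
  rw [List.map_map]
  rfl

-- A's answer in closed form: per skirt+top threshold, the number of jeans+shoes sums below it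
theorem pv_A_eq (J S K T : List Int) (dollars : Int) :
    shoppingOptions J S K T dollars =
      ((K.flatMap fun c => T.map fun d => dollars - (c + d)).map
        (fun t => ((J.flatMap fun a => S.map fun b => a + b).countP (fun x => decide (x ≤ t)) : Int))).sum := by
  simp only [shoppingOptions]
  -- the dict-building nested loop is one counting fold over the flattened sums list
  have hbuild : (J.foldl (fun hm a =>
      S.foldl (fun hm b =>
        if hm.contains (a + b) then hm.insert (a + b) (hm.getD (a + b) 0 + 1)
        else hm.insert (a + b) 1) hm) (PySem.Dict.empty : PySem.Dict Int Int))
      = (J.flatMap fun a => S.map fun b => a + b).foldl (fun hm x => hm.insert x (hm.getD x 0 + 1)) PySem.Dict.empty := by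
    rw [List.foldl_flatMap]
    congr 1
    funext hm a
    rw [List.foldl_map]
    apply PySem.List.foldl_congr_mem
    intro d x _
    by_cases hc : d.contains (a + x)
    · simp [hc]
    · have h0 : d.getD (a + x) 0 = 0 :=
        PySem.Dict.getD_of_not_contains d 0 (by simpa using hc)
      simp [hc, h0]
  apply pv_A_aux
  · intro k
    rw [hbuild]
    simpa using PySem.Dict.getD_foldl_insert_add_one (J.flatMap fun a => S.map fun b => a + b) PySem.Dict.empty k
  · rw [hbuild]
    have := PySem.Dict.keys_foldl_insert (J.flatMap fun a => S.map fun b => a + b)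
      (fun (d : PySem.Dict Int Int) (x : Int) => d.getD x 0 + 1) PySem.Dict.empty
    simpa [PySem.Set.update_nil_left] using this

-- B's answer in the same closed form
theorem pv_B_eq (J S K T : List Int) (dollars : Int) :
    shoppingOptions_alt J S K T dollars =
      ((K.flatMap fun c => T.map fun d => dollars - (c + d)).map
        (fun t => ((J.flatMap fun a => S.map fun b => a + b).countP (fun x => decide (x ≤ t)) : Int))).sum := by
  unfold shoppingOptions_alt
  set L := (J.flatMap fun a => S.map fun b => a + b) with hL
  set TL := (K.flatMap fun c => T.map fun d => dollars - (c + d)) with hTL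
  have hsp : (PySem.List.sorted L (fun x => x) false).Pairwise (· ≤ ·) := by
    simpa using PySem.List.sorted_pairwise L (fun x => x)
  have htp : (PySem.List.sorted TL (fun x => x) false).Pairwise (· ≤ ·) := by
    simpa using PySem.List.sorted_pairwise TL (fun x => x)
  rw [pv_loop_eq _ hsp _ htp 0 0 (by omega) (by simp)]
  rw [zero_add]
  have hperm : (PySem.List.sorted TL (fun x => x) false).Perm TL := PySem.List.sorted_perm ..
  have hcong : ∀ t : Int, ((PySem.List.sorted L (fun x => x) false).countP (fun x => decide (x ≤ t)) : Int)
      = (L.countP (fun x => decide (x ≤ t)) : Int) := by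
    intro t
    exact_mod_cast (PySem.List.sorted_perm L (fun x => x) false).countP_eq (fun x => decide (x ≤ t))
  calc ((PySem.List.sorted TL (fun x => x) false).map
          (fun t => ((PySem.List.sorted L (fun x => x) false).countP (fun x => decide (x ≤ t)) : Int))).sum
      = ((PySem.List.sorted TL (fun x => x) false).map
          (fun t => (L.countP (fun x => decide (x ≤ t)) : Int))).sum :=
        congrArg _ (List.map_congr_left fun t _ => hcong t)
    _ = (TL.map (fun t => (L.countP (fun x => decide (x ≤ t)) : Int))).sum :=
        (hperm.map _).sum_eq

-- ===== VERDICT (by name: the statement is the Claim_ definition above) =====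
theorem shoppingOptions_spec : Claim_equal_shoppingOptions := by
  intro J S K T dollars _
  unfold Spec_shoppingOptions
  rw [pv_A_eq, pv_B_eq]
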